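-- pv_equiv track=rewrite | github.com/Zerwas/TheSmallestHardTreesPython | Python/treeGeneration.py | getFormulaFirstTuple
-- ===== SOURCE A (Python) =====
-- def getOrderedWords(alph, n, inc):
--     if n == 0:
--         return [""]
--     ws = []
--     for i in range(min(inc + 1, len(alph))):
--         ws += [alph[i] + w for w in getOrderedWords(alph[i:], n - 1, inc)]
--     return ws
--
-- def getFormulaFirstTuple(vs, n):
--     fst = [getOrderedWords("abcdefghijklmnopqrstuvwxyz", k, 1) for k in range(n)]
--     snd = [getOrderedWords("ABCDEFGHIJKLMNOPQRSTUVWXYZ"[:n], k, n) for k in range(n)]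
--     trd = [getOrderedWords(vs, k, len(vs)) for k in range(n)]
--
--     ws = []
--     for i in range(0, n):
--         for j in range(0, n - i):
--             ws += ['a' + u + v + w for u in fst[i] for v in snd[j] for w in trd[n - j - i - 1]]
--     return ws
-- ===== SOURCE B (Python) =====
-- import itertools
--
--
-- def getFormulaFirstTuple(vs, n):
--     lower = "abcdefghijklmnopqrstuvwxyz"
--
--     def fst_words(k):
--         # length-k lowercase words with first index <= 1 and consecutive
--         # index steps in {0, 1}: prefix sums of k bits, capped at 'z'
--         out = []
--         for bits in itertools.product((0, 1), repeat=k):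
--             idx = list(itertools.accumulate(bits))
--             if not idx or idx[-1] <= 25:
--                 out.append(''.join(lower[i] for i in idx))
--         return out
--
--     def cwr_words(alph, k):
--         return [''.join(c) for c in itertools.combinations_with_replacement(alph, k)]
--
--     F = [fst_words(k) for k in range(n)]
--     S = [cwr_words("ABCDEFGHIJKLMNOPQRSTUVWXYZ"[:n], k) for k in range(n)]
--     T = [cwr_words(vs, k) for k in range(n)]
--     return ['a' + u + v + w
--             for i in range(n)
--             for j in range(n - i)
--             for u in F[i]
--             for v in S[j]
--             for w in T[n - 1 - i - j]]
-- ===== Notes on version B (the rewrite author's own statement) =====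
-- stated objective: alternative
-- what changed: A's single recursive getOrderedWords (branching on a suffix alphabet with a step bound) is replaced by two iterative generators: the step-≤1 lowercase words are built as prefix sums of bit vectors from itertools.product, and the unbounded-step words as itertools.combinations_with_replacement; the triple of loops collapses into one comprehension.
import Mathlib
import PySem

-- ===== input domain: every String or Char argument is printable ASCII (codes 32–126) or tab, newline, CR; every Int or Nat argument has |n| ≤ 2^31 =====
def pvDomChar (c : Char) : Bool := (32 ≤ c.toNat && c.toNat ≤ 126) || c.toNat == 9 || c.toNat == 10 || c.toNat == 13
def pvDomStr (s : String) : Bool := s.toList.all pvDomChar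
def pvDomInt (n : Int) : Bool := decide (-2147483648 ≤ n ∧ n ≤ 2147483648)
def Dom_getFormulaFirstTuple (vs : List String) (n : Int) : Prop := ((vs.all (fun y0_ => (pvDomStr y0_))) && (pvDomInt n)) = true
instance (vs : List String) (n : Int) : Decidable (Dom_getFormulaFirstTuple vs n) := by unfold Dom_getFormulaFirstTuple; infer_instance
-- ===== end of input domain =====

-- B replaces A's recursive getOrderedWords by iterative generators (bit-product with prefix sums for
-- the step-≤1 words; combinations-with-replacement over suffixes for the unbounded ones); same values.

-- ===== PORT A =====
-- A's getOrderedWords. A word/alphabet letter is a List Char (exact for Python str concatenation,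
-- which Lean's opaque String.append is not); a string alphabet becomes its list of one-char words
-- (Python alph[i] is a 1-char str); String.ofList converts the finished words back at the end.
def gowA (alph : List (List Char)) : Nat → Nat → List (List Char)
  | 0, _ => [[]]
  | m + 1, inc =>
    (List.range (min (inc + 1) alph.length)).foldl
      (fun ws i => ws ++ (gowA (alph.drop i) m inc).map (fun w => alph.getD i [] ++ w)) []

def lowerA : List (List Char) := "abcdefghijklmnopqrstuvwxyz".toList.map (fun c => [c])
def upperA : List (List Char) := "ABCDEFGHIJKLMNOPQRSTUVWXYZ".toList.map (fun c => [c])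

-- Python range(n) is empty for n ≤ 0 (then nothing below is used), so n.toNat is exact;
-- "ABC…"[:n] is take n.toNat likewise; inc arguments (1, n, len(vs)) are ≥ 0 wherever used.
def getFormulaFirstTuple (vs : List String) (n : Int) : List String :=
  let N := n.toNat
  let fst := (List.range N).map (fun k => gowA lowerA k 1)
  let snd := (List.range N).map (fun k => gowA (upperA.take N) k N)
  let trd := (List.range N).map (fun k => gowA (vs.map String.toList) k vs.length)
  let ws := (List.range N).foldl (fun ws i =>
      (List.range (N - i)).foldl (fun ws j =>
        ws ++ ((fst.getD i []).flatMap fun u =>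
               (snd.getD j []).flatMap fun v =>
               (trd.getD (N - j - i - 1) []).map fun w =>
                 'a' :: (u ++ v ++ w))) ws) []
  ws.map String.ofList

-- ===== PORT B =====
-- Source B: itertools.product((0,1), repeat=k), first component slowest
def bitLists : Nat → List (List Nat)
  | 0 => [[]]
  | k + 1 => [0, 1].flatMap (fun b => (bitLists k).map (b :: ·))

-- itertools.accumulate bits
def accum (s : Nat) : List Nat → List Nat
  | [] => []
  | b :: bs => (s + b) :: accum (s + b) bs

-- Source B fst_words: prefix sums of k bits, kept if they stay within the 26 letters
def fstB (k : Nat) : List (List Char) :=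
  (bitLists k).filterMap (fun bits =>
    let idx := accum 0 bits
    if idx.getLastD 0 ≤ 25 then
      some ((idx.map (fun i => lowerA.getD i [])).flatten)   -- ''.join(lower[i] for i in idx)
    else none)

-- Source B cwr_words: itertools.combinations_with_replacement (no Lean counterpart; ported by hand:
-- choose a suffix, take its head, recurse on the same suffix — exact for the library's order)
def cwrB (alph : List (List Char)) : Nat → List (List Char)
  | 0 => [[]]
  | k + 1 => alph.tails.flatMap (fun t =>
      match t with
      | [] => []
      | a :: rest => (cwrB (a :: rest) k).map (fun w => a ++ w))

def getFormulaFirstTuple_alt (vs : List String) (n : Int) : List String :=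
  let N := n.toNat
  let F := (List.range N).map fstB
  let S := (List.range N).map (fun k => cwrB (upperA.take N) k)
  let T := (List.range N).map (fun k => cwrB (vs.map String.toList) k)
  ((List.range N).flatMap fun i =>
    (List.range (N - i)).flatMap fun j =>
      (F.getD i []).flatMap fun u =>
        (S.getD j []).flatMap fun v =>
          (T.getD (N - 1 - i - j) []).map fun w =>
            'a' :: (u ++ v ++ w)).map String.ofList

-- ===== PRECONDITION & SPEC =====
def Spec_getFormulaFirstTuple (vs : List String) (n : Int) (out : List String) : Prop := out = getFormulaFirstTuple_alt vs n
instance (vs : List String) (n : Int) (out : List String) : Decidable (Spec_getFormulaFirstTuple vs n out) := by unfold Spec_getFormulaFirstTuple; infer_instance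

-- ===== CLAIM (what is proved, stated in full; the proofs are below) =====
def Claim_equal_getFormulaFirstTuple : Prop := ∀ (vs : List String) (n : Int), Dom_getFormulaFirstTuple vs n → Spec_getFormulaFirstTuple vs n (getFormulaFirstTuple vs n)

-- ===== LEMMAS AND PROOFS =====

theorem accum_shift (bs : List Nat) (s : Nat) : accum (s + 1) bs = (accum s bs).map (· + 1) := by
  induction bs generalizing s with
  | nil => rfl
  | cons b bs ih => simp [accum, Nat.add_right_comm s 1 b, ih]

theorem getLastD_map_succ (t : List Nat) (s : Nat) :
    (t.map (· + 1)).getLastD (s + 1) = t.getLastD s + 1 := by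
  induction t generalizing s with
  | nil => rfl
  | cons x t ih => rw [List.map_cons, List.getLastD_cons, List.getLastD_cons, ih]

theorem tails_flatMap {α β : Type} (alph : List α) (g : List α → List β) (hg : g [] = []) :
    alph.tails.flatMap g = (List.range alph.length).flatMap (fun i => g (alph.drop i)) := by
  induction alph with
  | nil => simp [hg]
  | cons a rest ih =>
      rw [List.tails_cons, List.flatMap_cons, ih]
      simp [List.range_succ_eq_map, List.flatMap_map, List.drop_succ_cons]

theorem cwr_eq (k : Nat) (alph : List (List Char)) (inc : Nat) (h : alph.length ≤ inc + 1) :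
    gowA alph k inc = cwrB alph k := by
  induction k generalizing alph with
  | zero => rfl
  | succ k ih =>
      rw [gowA, cwrB, Nat.min_eq_right h,
        PySem.List.foldl_append_eq_flatMap
          (fun i => (gowA (alph.drop i) k inc).map (fun w => alph.getD i [] ++ w)) _ [],
        List.nil_append,
        tails_flatMap alph _ rfl]
      apply List.flatMap_congr
      intro i hi
      have hlt : i < alph.length := by simpa using hi
      rw [List.drop_eq_getElem_cons hlt]
      have := ih (alph.drop i) (le_trans (by simp) h)
      rw [List.drop_eq_getElem_cons hlt] at this
      simp only [this]
      congr 1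
      funext w
      congr 1
      exact (List.getD_eq_getElem alph [] hlt)

-- the value of Source B's fst_words filter body, over an arbitrary suffix alphabet
def innerF (alph : List (List Char)) (bits : List Nat) : Option (List Char) :=
  let idx := accum 0 bits
  if idx.getLastD 0 ≤ alph.length - 1 then
    some ((idx.map (fun i => alph.getD i [])).flatten)
  else none

theorem innerF_zero (alph : List (List Char)) (bs : List Nat) :
    innerF alph (0 :: bs) = (innerF alph bs).map (fun w => alph.getD 0 [] ++ w) := by
  simp only [innerF, accum, Nat.add_zero, List.getLastD_cons]
  split_ifs with hc
  · simp
  · simp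

theorem innerF_one (alph : List (List Char)) (bs : List Nat) (h2 : 2 ≤ alph.length) :
    innerF alph (1 :: bs) = (innerF (alph.drop 1) bs).map (fun w => alph.getD 1 [] ++ w) := by
  have hsh : accum (0 + 1) bs = (accum 0 bs).map (· + 1) := accum_shift bs 0
  simp only [innerF, accum, Nat.zero_add, hsh, List.getLastD_cons, getLastD_map_succ,
    List.length_drop]
  have hiff : ((accum 0 bs).getLastD 0 + 1 ≤ alph.length - 1)
      ↔ ((accum 0 bs).getLastD 0 ≤ alph.length - 1 - 1) := by omega
  split_ifs with hc hc' hc'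
  · congr 1
    simp [List.map_map, Function.comp_def]
  · exact absurd (hiff.mp hc) hc'
  · exact absurd (hiff.mpr hc') hc
  · rfl

theorem innerF_one_none (alph : List (List Char)) (bs : List Nat) (h1 : alph.length = 1) :
    innerF alph (1 :: bs) = none := by
  have hsh : accum (0 + 1) bs = (accum 0 bs).map (· + 1) := accum_shift bs 0
  simp only [innerF, accum, Nat.zero_add, hsh, List.getLastD_cons, getLastD_map_succ, h1]
  split_ifs with hc
  · exact absurd hc (by omega)
  · rfl

theorem gow1_eq (k : Nat) (alph : List (List Char)) (h : 1 ≤ alph.length) :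
    gowA alph k 1 = (bitLists k).filterMap (innerF alph) := by
  induction k generalizing alph with
  | zero => simp [gowA, bitLists, innerF, accum]
  | succ k ih =>
      rw [gowA, bitLists]
      have hsplit : (([0, 1].flatMap (fun b => (bitLists k).map (b :: ·))).filterMap (innerF alph))
          = ((bitLists k).filterMap (fun bs => innerF alph (0 :: bs)))
            ++ ((bitLists k).filterMap (fun bs => innerF alph (1 :: bs))) := by
        simp [List.filterMap_append, List.filterMap_map]
      rw [hsplit]
      have hP0 : (bitLists k).filterMap (fun bs => innerF alph (0 :: bs))
          = (gowA alph k 1).map (fun w => alph.getD 0 [] ++ w) := by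
        rw [ih alph h]
        simp only [innerF_zero, ← List.map_filterMap]
      by_cases h2 : 2 ≤ alph.length
      · have hd : 1 ≤ (alph.drop 1).length := by simp; omega
        have hP1 : (bitLists k).filterMap (fun bs => innerF alph (1 :: bs))
            = (gowA (alph.drop 1) k 1).map (fun w => alph.getD 1 [] ++ w) := by
          rw [ih (alph.drop 1) hd]
          calc (bitLists k).filterMap (fun bs => innerF alph (1 :: bs))
              = (bitLists k).filterMap
                  (fun bs => (innerF (alph.drop 1) bs).map (fun w => alph.getD 1 [] ++ w)) := by
                apply List.filterMap_congr; intro bs _; exact innerF_one alph bs h2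
            _ = ((bitLists k).filterMap (innerF (alph.drop 1))).map (fun w => alph.getD 1 [] ++ w) := by
                rw [List.map_filterMap]
        have hmin : min (1 + 1) alph.length = 2 := by omega
        rw [hmin, hP0, hP1]
        simp [List.range_succ]
      · have h1 : alph.length = 1 := by omega
        have hP1 : (bitLists k).filterMap (fun bs => innerF alph (1 :: bs)) = [] := by
          simp only [List.filterMap_eq_nil_iff]
          intro bs _; exact innerF_one_none alph bs h1
        have hmin : min (1 + 1) alph.length = 1 := by omega
        rw [hmin, hP0, hP1]
        simp [List.range_succ]

theorem fstB_eq (k : Nat) : gowA lowerA k 1 = fstB k := by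
  rw [gow1_eq k lowerA (by decide)]
  unfold fstB
  apply List.filterMap_congr
  intro bs _
  have hL : lowerA.length - 1 = 25 := by decide
  simp only [innerF]
  rw [hL]

-- ===== VERDICT (by name: the statement is the Claim_ definition above) =====
theorem getFormulaFirstTuple_spec : Claim_equal_getFormulaFirstTuple := by
  intro vs n _
  show getFormulaFirstTuple vs n = getFormulaFirstTuple_alt vs n
  have hS : ∀ k, gowA (upperA.take n.toNat) k n.toNat = cwrB (upperA.take n.toNat) k := by
    intro k
    apply cwr_eq
    rw [List.length_take]
    have h26 : upperA.length = 26 := by decide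
    omega
  have hT : ∀ k, gowA (vs.map String.toList) k vs.length = cwrB (vs.map String.toList) k := by
    intro k; apply cwr_eq; simp
  have eidx : ∀ i j : Nat, n.toNat - j - i - 1 = n.toNat - 1 - i - j := fun i j => by omega
  simp only [getFormulaFirstTuple, getFormulaFirstTuple_alt,
    PySem.List.foldl_append_eq_flatMap, List.nil_append, fstB_eq, hS, hT, eidx]
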